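-- pv_equiv track=rewrite | github.com/sajid3900/Regression-in-Solid-Mechanics | helpers.py | read_axes
-- ===== SOURCE A (Python) =====
-- def read_axes(data_format):
--     """Returns the axe indices from the data format string."""
--     assert len(data_format) > 1, "data_format string must be longer than 1"
--     # Batch
--     assert 'N' in data_format, 'Requires at least batch axis: N'
--     batch_axis = data_format.index('N')
--     # Feature or Channel
--     if 'F' in data_format:
--         feature_axis = data_format.index('F') - len(data_format)    # Use negative index here!
--     elif 'C' in data_format:
--         feature_axis = data_format.index('C') - len(data_format)    # Use negative index here!
--     else:
--         feature_axis = None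
--     # Sequence
--     if 'S' in data_format:
--         sequence_axis = data_format.index('S')
--     else:
--         sequence_axis = None
--     # Spatial axes (height, width, x, y, ...)
--     spatial_axes = [i for i, a in enumerate(data_format) if a in 'DWHXYZ']
--     # Iteration axis
--     if 'I' in data_format:
--         iter_axis = data_format.index('I')
--     else:
--         iter_axis = None
--     return batch_axis, feature_axis, sequence_axis, spatial_axes, iter_axis
-- ===== SOURCE B (Python) =====
-- def read_axes(data_format):
--     """Returns the axe indices from the data format string."""
--     assert len(data_format) > 1, "data_format string must be longer than 1"
--     assert 'N' in data_format, 'Requires at least batch axis: N'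
--     # Single BACKWARD sweep: walking right-to-left and overwriting makes the
--     # leftmost (first) occurrence the one that survives, and prepending keeps
--     # spatial indices in left-to-right order.
--     pN = pF = pC = pS = pI = None
--     spatial_axes = []
--     for i in range(len(data_format) - 1, -1, -1):
--         a = data_format[i]
--         if a == 'N':
--             pN = i
--         elif a == 'F':
--             pF = i
--         elif a == 'C':
--             pC = i
--         elif a == 'S':
--             pS = i
--         elif a == 'I':
--             pI = i
--         elif a in 'DWHXYZ':
--             spatial_axes = [i] + spatial_axes
--     n = len(data_format)
--     if pF is not None:
--         feature_axis = pF - n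
--     elif pC is not None:
--         feature_axis = pC - n
--     else:
--         feature_axis = None
--     return pN, feature_axis, pS, spatial_axes, pI
-- ===== Notes on version B (the rewrite author's own statement) =====
-- stated objective: alternative
-- what changed: Replaces A's six independent forward scans (repeated 'in' tests, str.index calls and an enumerate comprehension) by one backward sweep over the indices with plain overwrite variables: walking right-to-left, each later occurrence is overwritten by an earlier one, so the surviving value is the first occurrence, and spatial indices are prepended so they come out left-to-right.
import Mathlib
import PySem

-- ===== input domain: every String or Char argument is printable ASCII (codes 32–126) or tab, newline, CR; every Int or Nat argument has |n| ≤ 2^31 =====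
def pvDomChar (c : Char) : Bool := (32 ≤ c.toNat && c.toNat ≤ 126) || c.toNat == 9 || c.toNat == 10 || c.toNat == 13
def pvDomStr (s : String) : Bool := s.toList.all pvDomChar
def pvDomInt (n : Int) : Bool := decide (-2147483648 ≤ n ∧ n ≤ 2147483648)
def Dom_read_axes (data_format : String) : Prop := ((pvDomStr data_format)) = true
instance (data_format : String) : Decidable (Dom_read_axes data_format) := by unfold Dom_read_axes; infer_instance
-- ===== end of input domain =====

-- B replaces A's six independent forward scans by one backward sweep with overwrite
-- variables (objective: alternative; return value only).
-- In both ports, Python's "c in s" / "s.index(c)" for a single character c is ported as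
-- character membership / PySem.List.index? on s.toList, which is exact for length-1 needles.

-- ===== PORT A =====
-- first index of character c in cs (str.index for a length-1 needle); each use in A is
-- guarded by an 'in' test (or the assert), so the getD default is never reached inside Pre_.
def pvIdxA (cs : List Char) (c : Char) : Int :=
  ((PySem.List.index? cs c).getD 0 : Nat)

def read_axes (data_format : String) : Int × Option Int × Option Int × List Int × Option Int :=
  let cs := data_format.toList
  let n : Int := cs.length
  let batch_axis : Int := pvIdxA cs 'N'
  let feature_axis : Option Int :=
    if 'F' ∈ cs then some (pvIdxA cs 'F' - n)
    else if 'C' ∈ cs then some (pvIdxA cs 'C' - n)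
    else none
  let sequence_axis : Option Int := if 'S' ∈ cs then some (pvIdxA cs 'S') else none
  let spatial_axes : List Int :=
    ((PySem.List.enumerate cs 0).filter (fun p => decide (p.2 ∈ ['D','W','H','X','Y','Z']))).map (·.1)
  let iter_axis : Option Int := if 'I' ∈ cs then some (pvIdxA cs 'I') else none
  (batch_axis, feature_axis, sequence_axis, spatial_axes, iter_axis)

-- ===== PORT B =====
-- the state of B's backward sweep: (pN, pF, pC, pS, pI, spatial_axes)
-- B's loop body: one descending-index iteration = one foldr step over the enumeration
def pvStepB (p : Int × Char) (st : Option Int × Option Int × Option Int × Option Int × Option Int × List Int) :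
    Option Int × Option Int × Option Int × Option Int × Option Int × List Int :=
  match st with
  | (pN, pF, pC, pS, pI, sp) =>
    if p.2 = 'N' then (some p.1, pF, pC, pS, pI, sp)
    else if p.2 = 'F' then (pN, some p.1, pC, pS, pI, sp)
    else if p.2 = 'C' then (pN, pF, some p.1, pS, pI, sp)
    else if p.2 = 'S' then (pN, pF, pC, some p.1, pI, sp)
    else if p.2 = 'I' then (pN, pF, pC, pS, some p.1, sp)
    else if p.2 ∈ ['D','W','H','X','Y','Z'] then (pN, pF, pC, pS, pI, p.1 :: sp)
    else st

def read_axes_alt (data_format : String) : Int × Option Int × Option Int × List Int × Option Int :=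
  let cs := data_format.toList
  match (PySem.List.enumerate cs 0).foldr pvStepB (none, none, none, none, none, []) with
  | (pN, pF, pC, pS, pI, sp) =>
    let n : Int := cs.length
    let feature_axis : Option Int :=
      match pF with
      | some v => some (v - n)
      | none => match pC with
                | some v => some (v - n)
                | none => none
    (pN.getD 0, feature_axis, pS, sp, pI)

-- ===== PRECONDITION & SPEC =====
-- Pre_ excludes exactly the inputs on which A raises an AssertionError
-- (length ≤ 1, or no 'N' in the string); B raises there too.
def Pre_read_axes (data_format : String) : Prop :=
  1 < data_format.toList.length ∧ 'N' ∈ data_format.toList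
instance (data_format : String) : Decidable (Pre_read_axes data_format) := by
  unfold Pre_read_axes; infer_instance

def pvWitness_read_axes : String := "NCHW"

def Spec_read_axes (data_format : String) (out : Int × Option Int × Option Int × List Int × Option Int) : Prop := out = read_axes_alt data_format
instance (data_format : String) (out : Int × Option Int × Option Int × List Int × Option Int) : Decidable (Spec_read_axes data_format out) := by unfold Spec_read_axes; infer_instance

-- ===== CLAIM (what is proved, stated in full; the proofs are below) =====
def Claim_equal_read_axes : Prop := ∀ (data_format : String), Dom_read_axes data_format → Pre_read_axes data_format → Spec_read_axes data_format (read_axes data_format)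

-- ===== LEMMAS AND PROOFS =====

-- membership gives a first index
theorem pvIndexSome (cs : List Char) (c : Char) (h : c ∈ cs) :
    ∃ k, PySem.List.index? cs c = some k := by
  have hs := (PySem.List.index?_isSome_iff (xs := cs) (v := c)).mpr h
  exact Option.isSome_iff_exists.mp hs

-- B's backward sweep computes, for each tracked letter, its first index in cs
-- (offset by s), and the spatial indices of the enumeration in order.
theorem pvScanB (cs : List Char) (s : Int) :
    (PySem.List.enumerate cs s).foldr pvStepB (none, none, none, none, none, []) =
      ((PySem.List.index? cs 'N').map (fun k => s + (k : Int)),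
       (PySem.List.index? cs 'F').map (fun k => s + (k : Int)),
       (PySem.List.index? cs 'C').map (fun k => s + (k : Int)),
       (PySem.List.index? cs 'S').map (fun k => s + (k : Int)),
       (PySem.List.index? cs 'I').map (fun k => s + (k : Int)),
       ((PySem.List.enumerate cs s).filter
          (fun p => decide (p.2 ∈ ['D','W','H','X','Y','Z']))).map (·.1)) := by
  induction cs generalizing s with
  | nil => simp [PySem.List.enumerate_nil, PySem.List.index?_eq_idxOf?]
  | cons x xs ih =>
      have hshift : ∀ c : Char,
          (PySem.List.index? (x :: xs) c).map (fun k => s + (k : Int)) =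
            if x = c then some s
            else (PySem.List.index? xs c).map (fun k => (s + 1) + (k : Int)) := by
        intro c
        by_cases hx : x = c
        · subst hx; rw [PySem.List.index?_cons_self]; simp
        · rw [PySem.List.index?_cons_of_ne _ hx, if_neg hx]
          cases PySem.List.index? xs c <;> simp <;> omega
      rw [PySem.List.enumerate_cons, List.foldr_cons, ih (s + 1), List.filter_cons,
          hshift 'N', hshift 'F', hshift 'C', hshift 'S', hshift 'I']
      by_cases hN : x = 'N'
      · simp [pvStepB, hN]
      by_cases hF : x = 'F'
      · simp [pvStepB, hN, hF]
      by_cases hC : x = 'C'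
      · simp [pvStepB, hN, hF, hC]
      by_cases hS : x = 'S'
      · simp [pvStepB, hN, hF, hC, hS]
      by_cases hI : x = 'I'
      · simp [pvStepB, hN, hF, hC, hS, hI]
      by_cases hsp : x ∈ ['D','W','H','X','Y','Z']
      · simp [pvStepB, hN, hF, hC, hS, hI, hsp]
      · simp [pvStepB, hN, hF, hC, hS, hI, hsp]

-- first index as Int: getD form equals the map form when the letter occurs
theorem pvIdxA_eq (cs : List Char) (c : Char) (h : c ∈ cs) :
    some (pvIdxA cs c) = (PySem.List.index? cs c).map (fun k => 0 + (k : Int)) := by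
  obtain ⟨k, hk⟩ := pvIndexSome cs c h
  unfold pvIdxA
  rw [hk]
  simp

-- absent letter gives none
theorem pvIdxNone (cs : List Char) (c : Char) (h : c ∉ cs) :
    (PySem.List.index? cs c).map (fun k => 0 + (k : Int)) = none := by
  rw [(PySem.List.index?_eq_none_iff _ _).mpr h]; rfl

-- ===== VERDICT (by name: the statement is the Claim_ definition above) =====
theorem read_axes_spec : Claim_equal_read_axes := by
  intro df _ hpre
  obtain ⟨hlen, hN⟩ := hpre
  unfold Spec_read_axes read_axes read_axes_alt
  simp only [pvScanB]
  set cs := df.toList with hcs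
  refine congrArg₂ Prod.mk ?_ (congrArg₂ Prod.mk ?_ (congrArg₂ Prod.mk ?_ (congrArg₂ Prod.mk ?_ ?_)))
  · -- batch axis
    rw [← pvIdxA_eq cs 'N' hN]; rfl
  · -- feature axis
    by_cases hF : 'F' ∈ cs
    · rw [if_pos hF, ← pvIdxA_eq cs 'F' hF]
    · rw [if_neg hF, pvIdxNone cs 'F' hF]
      by_cases hC : 'C' ∈ cs
      · rw [if_pos hC, ← pvIdxA_eq cs 'C' hC]
      · rw [if_neg hC, pvIdxNone cs 'C' hC]
  · -- sequence axis
    by_cases hS : 'S' ∈ cs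
    · rw [if_pos hS, ← pvIdxA_eq cs 'S' hS]
    · rw [if_neg hS, pvIdxNone cs 'S' hS]
  · -- spatial axes
    rfl
  · -- iteration axis
    by_cases hI : 'I' ∈ cs
    · rw [if_pos hI, ← pvIdxA_eq cs 'I' hI]
    · rw [if_neg hI, pvIdxNone cs 'I' hI]
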